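-- pv_equiv track=rewrite | github.com/CfyRJ/difference-generator | gendiff/gendiff.py | conversion_file_type
-- ===== SOURCE A (Python) =====
-- CONSTANT_JSON = {'False': 'false', 'True': 'true', 'None': 'null'}
--
-- CONSTANT_YAML = {'False': 'false', 'True': 'true', 'None': 'null'}
--
-- def conversion_file_type(val_dif: str, format: str) -> str:
--     if format == 'json':
--         format = CONSTANT_JSON
--     if format in ('yaml', 'yml'):
--         format = CONSTANT_YAML
--
--     for k, v in format.items():
--         val_dif = val_dif.replace(k, v)
--
--     return val_dif
-- ===== SOURCE B (Python) =====
-- CONSTANT_JSON = {'False': 'false', 'True': 'true', 'None': 'null'}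
--
-- CONSTANT_YAML = {'False': 'false', 'True': 'true', 'None': 'null'}
--
-- def conversion_file_type(val_dif: str, format: str) -> str:
--     mapping = CONSTANT_JSON if format == 'json' else CONSTANT_YAML if format in ('yaml', 'yml') else format
--     keys = list(mapping.keys())  # unrecognized format: str has no .keys() -> AttributeError, as in the original
--     out = []
--     i = 0
--     n = len(val_dif)
--     while i < n:
--         for k in keys:
--             if val_dif.startswith(k, i):
--                 out.append(mapping[k])
--                 i += len(k)
--                 break
--         else:
--             out.append(val_dif[i])
--             i += 1
--     return ''.join(out)
-- ===== Notes on version B (the rewrite author's own statement) =====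
-- stated objective: alternative
-- what changed: Instead of three sequential full-string str.replace passes (one per mapping entry), B makes a single left-to-right scan that at each position tries the mapping's keys and emits the replacement or the character.
import Mathlib
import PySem

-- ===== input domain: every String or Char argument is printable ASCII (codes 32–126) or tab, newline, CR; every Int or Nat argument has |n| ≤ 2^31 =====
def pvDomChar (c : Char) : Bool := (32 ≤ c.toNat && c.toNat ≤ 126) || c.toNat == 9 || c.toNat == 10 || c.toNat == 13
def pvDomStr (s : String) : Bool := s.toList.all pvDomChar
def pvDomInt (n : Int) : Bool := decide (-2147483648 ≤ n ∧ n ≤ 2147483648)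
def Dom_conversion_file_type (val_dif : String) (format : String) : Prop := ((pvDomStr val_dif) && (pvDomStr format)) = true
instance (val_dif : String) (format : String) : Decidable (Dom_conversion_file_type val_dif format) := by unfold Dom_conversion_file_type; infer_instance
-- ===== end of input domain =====

-- B replaces A's three sequential full-string str.replace passes by one single left-to-right
-- scan that tries the mapping's keys at each position (objective: alternative; one pass instead of three).

-- ===== PORT A =====
def pvCONSTANT_JSON : PySem.Dict String String :=
  PySem.Dict.ofList [("False", "false"), ("True", "true"), ("None", "null")]
def pvCONSTANT_YAML : PySem.Dict String String :=
  PySem.Dict.ofList [("False", "false"), ("True", "true"), ("None", "null")]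

def conversion_file_type (val_dif : String) (format : String) : String :=
  let d : PySem.Dict String String :=
    if format = "json" then pvCONSTANT_JSON
    else if format = "yaml" ∨ format = "yml" then pvCONSTANT_YAML
    else PySem.Dict.empty  -- here the Python A raises AttributeError (str has no .items()); excluded by Pre_
  d.items.foldl (fun acc kv => PySem.Str.replace acc kv.1 kv.2) val_dif

-- ===== PORT B =====
-- B's while-loop over positions: at each position try the keys in order; on a match emit the
-- mapped value and skip the key, otherwise emit the character and advance by one.
def bScan : List Char → List Char
  | [] => []
  | c :: t =>
    if List.isPrefixOf ['F','a','l','s','e'] (c :: t) then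
      ['f','a','l','s','e'] ++ bScan (List.drop 4 t)
    else if List.isPrefixOf ['T','r','u','e'] (c :: t) then
      ['t','r','u','e'] ++ bScan (List.drop 3 t)
    else if List.isPrefixOf ['N','o','n','e'] (c :: t) then
      ['n','u','l','l'] ++ bScan (List.drop 3 t)
    else c :: bScan t
termination_by l => l.length
decreasing_by all_goals simp

def conversion_file_type_alt (val_dif : String) (format : String) : String :=
  if format = "json" ∨ format = "yaml" ∨ format = "yml" then
    String.ofList (bScan val_dif.toList)
  else val_dif  -- here the Python B raises AttributeError (str has no .keys()); excluded by Pre_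

-- ===== PRECONDITION & SPEC =====
-- Pre_ excludes exactly the formats other than 'json'/'yaml'/'yml', on which both A and B raise AttributeError.
def Pre_conversion_file_type (val_dif : String) (format : String) : Prop :=
  format = "json" ∨ format = "yaml" ∨ format = "yml"
instance (val_dif : String) (format : String) : Decidable (Pre_conversion_file_type val_dif format) := by
  unfold Pre_conversion_file_type; infer_instance

def pvWitness_conversion_file_type : String × String := ("True or False is None", "json")

def Spec_conversion_file_type (val_dif : String) (format : String) (out : String) : Prop := out = conversion_file_type_alt val_dif format
instance (val_dif : String) (format : String) (out : String) : Decidable (Spec_conversion_file_type val_dif format out) := by unfold Spec_conversion_file_type; infer_instance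

-- ===== CLAIM (what is proved, stated in full; the proofs are below) =====
def Claim_equal_conversion_file_type : Prop := ∀ (val_dif : String) (format : String), Dom_conversion_file_type val_dif format → Pre_conversion_file_type val_dif format → Spec_conversion_file_type val_dif format (conversion_file_type val_dif format)

-- ===== LEMMAS AND PROOFS =====

-- A generic single replace pass (what PySem.Chars.replace computes for a nonempty pattern).
def scanR (o : Char) (os new : List Char) : List Char → List Char
  | [] => []
  | c :: t =>
    if List.isPrefixOf (o :: os) (c :: t) then
      new ++ scanR o os new (List.drop os.length t)
    else c :: scanR o os new t
termination_by l => l.length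
decreasing_by all_goals simp

theorem go_eq_scanR (o : Char) (os new : List Char) :
    ∀ (fuel : Nat) (l acc : List Char), l.length ≤ fuel →
      PySem.Chars.replace.go (o :: os) new fuel l acc = acc.reverse ++ scanR o os new l := by
  intro fuel
  induction fuel with
  | zero =>
    intro l acc h
    have : l = [] := List.length_eq_zero_iff.mp (Nat.le_zero.mp h)
    subst this
    simp [PySem.Chars.replace.go, scanR]
  | succ n ih =>
    intro l acc h
    cases l with
    | nil => simp [PySem.Chars.replace.go, scanR]
    | cons c t =>
      rw [PySem.Chars.replace.go]
      by_cases hp : List.isPrefixOf (o :: os) (c :: t) = true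
      · rw [if_pos hp, scanR, if_pos hp]
        rw [ih]
        · simp
        · simp at h ⊢; omega
      · rw [if_neg hp, scanR, if_neg hp]
        rw [ih t (c :: acc) (by simp at h ⊢; omega)]
        simp

theorem replace_eq_scanR (o : Char) (os new s : List Char) :
    PySem.Chars.replace s (o :: os) new = scanR o os new s := by
  rw [PySem.Chars.replace]
  simp only [List.isEmpty_cons, if_false, Bool.false_eq_true]
  exact go_eq_scanR o os new s.length s [] (le_refl _)

-- a match at the head of the input
theorem scanR_match (o : Char) (os new r : List Char) :
    scanR o os new (o :: (os ++ r)) = new ++ scanR o os new r := by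
  have h1 : List.isPrefixOf (o :: os) (o :: (os ++ r)) = true := by
    rw [List.isPrefixOf_iff_prefix]; exact ⟨r, by simp⟩
  cases hx : os ++ r with
  | nil =>
    have hos : os = [] := by cases os <;> simp_all
    subst hos; simp at hx; subst hx
    rw [scanR]; simp [scanR]
  | cons d u =>
    rw [← hx, scanR, if_pos h1, List.drop_left]

-- the scan passes unchanged over a block containing no occurrence of the pattern's first char
theorem scanR_comm (o : Char) (os new : List Char) :
    ∀ (p r : List Char), o ∉ p → scanR o os new (p ++ r) = p ++ scanR o os new r := by
  intro p
  induction p with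
  | nil => intro r _; simp
  | cons d p' ih =>
    intro r hm
    have hd : o ≠ d := fun h => hm (h ▸ List.mem_cons_self)
    have hp : List.isPrefixOf (o :: os) (d :: (p' ++ r)) = false := by
      simp [List.isPrefixOf, hd]
    rw [List.cons_append, scanR, hp]
    simp only [Bool.false_eq_true, if_false]
    rw [ih r (fun h => hm (List.mem_cons_of_mem _ h))]
    simp

theorem scanR_comm_cons (o : Char) (os new : List Char) (d : Char) (p r : List Char)
    (h : o ∉ d :: p) :
    scanR o os new (d :: (p ++ r)) = d :: (p ++ scanR o os new r) := by
  simpa using scanR_comm o os new (d :: p) r h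

-- a scan with a nonempty replacement cannot create a new occurrence of a word
-- avoiding the replacement's first character
theorem scanR_prefix_inv (o : Char) (os : List Char) (m : Char) (ms : List Char) :
    ∀ (n : Nat) (t : List Char), t.length ≤ n → ∀ w : List Char, m ∉ w →
      w <+: scanR o os (m :: ms) t → w <+: t := by
  intro n
  induction n with
  | zero =>
    intro t ht w _ hw
    have : t = [] := List.length_eq_zero_iff.mp (Nat.le_zero.mp ht)
    subst this
    simpa [scanR] using hw
  | succ k ih =>
    intro t ht w hm hw
    cases t with
    | nil => simpa [scanR] using hw
    | cons c t' =>
      by_cases hp : List.isPrefixOf (o :: os) (c :: t') = true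
      · rw [scanR, if_pos hp] at hw
        cases w with
        | nil => exact List.nil_prefix
        | cons d w' =>
          rw [List.cons_append, List.cons_prefix_cons] at hw
          exact absurd hw.1.symm (fun h => hm (h ▸ List.mem_cons_self))
      · rw [scanR, if_neg hp] at hw
        cases w with
        | nil => exact List.nil_prefix
        | cons d w' =>
          rw [List.cons_prefix_cons] at hw
          have hw' : w' <+: t' :=
            ih t' (by simp at ht; omega) w' (fun h => hm (List.mem_cons_of_mem _ h)) hw.2
          rw [List.cons_prefix_cons]
          exact ⟨hw.1, hw'⟩

-- the three sequential passes equal the combined single pass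
theorem three_eq_bScan :
    ∀ (n : Nat) (L : List Char), L.length ≤ n →
      scanR 'N' ['o','n','e'] ['n','u','l','l']
        (scanR 'T' ['r','u','e'] ['t','r','u','e']
          (scanR 'F' ['a','l','s','e'] ['f','a','l','s','e'] L)) = bScan L := by
  intro n
  induction n with
  | zero =>
    intro L hL
    have : L = [] := List.length_eq_zero_iff.mp (Nat.le_zero.mp hL)
    subst this; simp [scanR, bScan]
  | succ k ih =>
    intro L hL
    cases L with
    | nil => simp [scanR, bScan]
    | cons c t =>
      by_cases hF : List.isPrefixOf ['F','a','l','s','e'] (c :: t) = true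
      · obtain ⟨L₂, hL₂⟩ := List.isPrefixOf_iff_prefix.mp hF
        have hform : c :: t = 'F' :: (['a','l','s','e'] ++ L₂) := by rw [← hL₂]; rfl
        have hF2 : List.isPrefixOf ['F','a','l','s','e'] ('F' :: (['a','l','s','e'] ++ L₂)) = true := hform ▸ hF
        rw [hform]
        rw [scanR_match 'F' ['a','l','s','e'] ['f','a','l','s','e'] L₂]
        rw [scanR_comm 'T' _ _ ['f','a','l','s','e'] _ (by decide)]
        rw [scanR_comm 'N' _ _ ['f','a','l','s','e'] _ (by decide)]
        rw [bScan.eq_def]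
        simp only [if_pos hF2]
        rw [show List.drop 4 (['a','l','s','e'] ++ L₂) = L₂ by simp]
        rw [hform] at hL; simp at hL
        rw [ih L₂ (by omega)]
      · by_cases hT : List.isPrefixOf ['T','r','u','e'] (c :: t) = true
        · obtain ⟨L₂, hL₂⟩ := List.isPrefixOf_iff_prefix.mp hT
          have hform : c :: t = 'T' :: (['r','u','e'] ++ L₂) := by rw [← hL₂]; rfl
          have hT2 : List.isPrefixOf ['T','r','u','e'] ('T' :: (['r','u','e'] ++ L₂)) = true := hform ▸ hT
          have hF2 : List.isPrefixOf ['F','a','l','s','e'] ('T' :: (['r','u','e'] ++ L₂)) = false := by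
            cases hb : List.isPrefixOf ['F','a','l','s','e'] ('T' :: (['r','u','e'] ++ L₂)) with
            | false => rfl
            | true => exact absurd (hform ▸ hb) hF
          rw [hform]
          rw [scanR_comm_cons 'F' _ _ 'T' ['r','u','e'] L₂ (by decide)]
          rw [scanR_match 'T' ['r','u','e'] ['t','r','u','e'] _]
          rw [scanR_comm 'N' _ _ ['t','r','u','e'] _ (by decide)]
          rw [bScan.eq_def]
          simp only [hT2, hF2, Bool.false_eq_true, if_false, if_true]
          rw [show List.drop 3 (['r','u','e'] ++ L₂) = L₂ by simp]
          rw [hform] at hL; simp at hL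
          rw [ih L₂ (by omega)]
        · by_cases hN : List.isPrefixOf ['N','o','n','e'] (c :: t) = true
          · obtain ⟨L₂, hL₂⟩ := List.isPrefixOf_iff_prefix.mp hN
            have hform : c :: t = 'N' :: (['o','n','e'] ++ L₂) := by rw [← hL₂]; rfl
            have hN2 : List.isPrefixOf ['N','o','n','e'] ('N' :: (['o','n','e'] ++ L₂)) = true := hform ▸ hN
            have hF2 : List.isPrefixOf ['F','a','l','s','e'] ('N' :: (['o','n','e'] ++ L₂)) = false := by
              cases hb : List.isPrefixOf ['F','a','l','s','e'] ('N' :: (['o','n','e'] ++ L₂)) with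
              | false => rfl
              | true => exact absurd (hform ▸ hb) hF
            have hT2 : List.isPrefixOf ['T','r','u','e'] ('N' :: (['o','n','e'] ++ L₂)) = false := by
              cases hb : List.isPrefixOf ['T','r','u','e'] ('N' :: (['o','n','e'] ++ L₂)) with
              | false => rfl
              | true => exact absurd (hform ▸ hb) hT
            rw [hform]
            rw [scanR_comm_cons 'F' _ _ 'N' ['o','n','e'] L₂ (by decide)]
            rw [scanR_comm_cons 'T' _ _ 'N' ['o','n','e'] _ (by decide)]
            rw [scanR_match 'N' ['o','n','e'] ['n','u','l','l'] _]
            rw [bScan.eq_def]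
            simp only [hN2, hF2, hT2, Bool.false_eq_true, if_false, if_true]
            rw [show List.drop 3 (['o','n','e'] ++ L₂) = L₂ by simp]
            rw [hform] at hL; simp at hL
            rw [ih L₂ (by omega)]
          · -- no key matches at this position
            have ht : t.length ≤ k := by simp at hL; omega
            rw [scanR, if_neg hF]
            -- 'True' does not start at the head of c :: F-scan t
            have hT' : List.isPrefixOf ['T','r','u','e']
                (c :: scanR 'F' ['a','l','s','e'] ['f','a','l','s','e'] t) = false := by
              by_contra h
              have h' := List.isPrefixOf_iff_prefix.mp (by
                cases hb : List.isPrefixOf ['T','r','u','e']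
                  (c :: scanR 'F' ['a','l','s','e'] ['f','a','l','s','e'] t) <;> simp_all)
              rw [List.cons_prefix_cons] at h'
              have hrue : ['r','u','e'] <+: t :=
                scanR_prefix_inv 'F' ['a','l','s','e'] 'f' ['a','l','s','e'] t.length t
                  (le_refl _) ['r','u','e'] (by decide) h'.2
              have : List.isPrefixOf ['T','r','u','e'] (c :: t) = true := by
                rw [List.isPrefixOf_iff_prefix, show (['T','r','u','e'] : List Char)
                      = 'T' :: ['r','u','e'] from rfl, List.cons_prefix_cons]
                exact ⟨h'.1, hrue⟩
              exact hT this
            rw [scanR, hT']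
            simp only [Bool.false_eq_true, if_false]
            -- 'None' does not start at the head of c :: T-scan (F-scan t)
            have hN' : List.isPrefixOf ['N','o','n','e']
                (c :: scanR 'T' ['r','u','e'] ['t','r','u','e']
                  (scanR 'F' ['a','l','s','e'] ['f','a','l','s','e'] t)) = false := by
              by_contra h
              have h' := List.isPrefixOf_iff_prefix.mp (by
                cases hb : List.isPrefixOf ['N','o','n','e']
                  (c :: scanR 'T' ['r','u','e'] ['t','r','u','e']
                    (scanR 'F' ['a','l','s','e'] ['f','a','l','s','e'] t)) <;> simp_all)
              rw [List.cons_prefix_cons] at h'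
              have hone1 : ['o','n','e'] <+: scanR 'F' ['a','l','s','e'] ['f','a','l','s','e'] t :=
                scanR_prefix_inv 'T' ['r','u','e'] 't' ['r','u','e'] _ _ (le_refl _)
                  ['o','n','e'] (by decide) h'.2
              have hone : ['o','n','e'] <+: t :=
                scanR_prefix_inv 'F' ['a','l','s','e'] 'f' ['a','l','s','e'] t.length t
                  (le_refl _) ['o','n','e'] (by decide) hone1
              have : List.isPrefixOf ['N','o','n','e'] (c :: t) = true := by
                rw [List.isPrefixOf_iff_prefix, show (['N','o','n','e'] : List Char)
                      = 'N' :: ['o','n','e'] from rfl, List.cons_prefix_cons]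
                exact ⟨h'.1, hone⟩
              exact hN this
            rw [scanR, hN']
            simp only [Bool.false_eq_true, if_false]
            rw [bScan.eq_def]
            simp only [if_neg hF, if_neg hT, if_neg hN]
            rw [ih t ht]

-- ===== VERDICT (by name: the statement is the Claim_ definition above) =====
theorem conversion_file_type_spec : Claim_equal_conversion_file_type := by
  intro val_dif format _ hpre
  unfold Spec_conversion_file_type conversion_file_type conversion_file_type_alt
  have hsel : (if format = "json" then pvCONSTANT_JSON
      else if format = "yaml" ∨ format = "yml" then pvCONSTANT_YAML
      else PySem.Dict.empty) = pvCONSTANT_JSON := by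
    rcases hpre with h | h | h <;> simp [h, pvCONSTANT_JSON, pvCONSTANT_YAML]
  have hpre' : format = "json" ∨ format = "yaml" ∨ format = "yml" := hpre
  rw [hsel, if_pos hpre']
  show List.foldl _ _ _ = _
  rw [show pvCONSTANT_JSON.items
        = [("False", "false"), ("True", "true"), ("None", "null")] from rfl]
  simp only [List.foldl_cons, List.foldl_nil]
  simp only [PySem.Str.replace, String.toList_ofList]
  congr 1
  rw [show ("False" : String).toList = 'F' :: ['a','l','s','e'] from rfl,
      show ("True" : String).toList = 'T' :: ['r','u','e'] from rfl,
      show ("None" : String).toList = 'N' :: ['o','n','e'] from rfl,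
      show ("false" : String).toList = ['f','a','l','s','e'] from rfl,
      show ("true" : String).toList = ['t','r','u','e'] from rfl,
      show ("null" : String).toList = ['n','u','l','l'] from rfl]
  rw [replace_eq_scanR, replace_eq_scanR, replace_eq_scanR]
  exact three_eq_bScan val_dif.toList.length val_dif.toList (le_refl _)
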